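-- pv_equiv track=rewrite | github.com/CLg003/wk02_day1_single_class_lab | extra_challenges.py | unique_repeat_count
-- ===== SOURCE A (Python) =====
-- def unique_repeat_count(list):
--     counter = 0
--     repeated_words = []
--     for index in range(0, len(list)-1):
--         if (list[index] not in repeated_words) and (list[index] == list[index + 1]):
--             counter += 1
--             repeated_words.append(list[index])
--     return counter
-- ===== SOURCE B (Python) =====
-- def unique_repeat_count(list):
--     # Run-length encode the list, then count the distinct values that own a run of length >= 2.
--     runs = []
--     for x in list:
--         if runs and runs[-1][0] == x:
--             runs[-1] = (x, runs[-1][1] + 1)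
--         else:
--             runs.append((x, 1))
--     dups = []
--     for v, n in runs:
--         if n >= 2 and v not in dups:
--             dups.append(v)
--     return len(dups)
-- ===== Notes on version B (the rewrite author's own statement) =====
-- stated objective: alternative
-- what changed: B first run-length encodes the list into (value, run-length) pairs in one pass, then counts the distinct values owning a run of length >= 2, instead of A's index loop over adjacent pairs with a counter and an in-loop membership scan of the growing seen-list.
import Mathlib
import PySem

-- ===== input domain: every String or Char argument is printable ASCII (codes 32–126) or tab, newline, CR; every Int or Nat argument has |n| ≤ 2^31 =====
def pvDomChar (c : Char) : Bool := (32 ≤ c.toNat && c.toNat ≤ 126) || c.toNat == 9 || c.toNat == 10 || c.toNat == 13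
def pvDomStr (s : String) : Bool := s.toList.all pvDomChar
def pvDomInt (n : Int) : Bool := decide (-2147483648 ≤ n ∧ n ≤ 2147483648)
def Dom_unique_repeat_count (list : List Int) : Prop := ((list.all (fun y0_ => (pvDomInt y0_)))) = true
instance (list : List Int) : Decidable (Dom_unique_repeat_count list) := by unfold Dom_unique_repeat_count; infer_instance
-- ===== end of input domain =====

-- B replaces A's adjacent-pair index loop (counter + in-loop membership list) with a different
-- algorithm: run-length encode the list, then count the distinct values owning a run of length ≥ 2.

-- ===== PORT A =====
-- for index in range(0, len(list)-1): indices index and index+1 are always in range,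
-- so pyGetD with a default is exact here (the default is never read).
def unique_repeat_count (list : List Int) : Int :=
  (PySem.List.pyRange 0 ((list.length : Int) - 1) 1).foldl
    (fun (st : Int × List Int) index =>
      if (!(st.2.contains (PySem.List.pyGetD list index 0))) &&
         (PySem.List.pyGetD list index 0 == PySem.List.pyGetD list (index + 1) 0) then
        (st.1 + 1, st.2 ++ [PySem.List.pyGetD list index 0])
      else st)
    (0, []) |>.1

-- ===== PORT B =====
-- Python keeps `runs` with its LAST run at runs[-1]; the Lean fold keeps the runs reversed
-- (current run at the head) and reverses at the end — the same runs, built the same way.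
def pvStepRun (rs : List (Int × Int)) (x : Int) : List (Int × Int) :=
  match rs with
  | (v, n) :: r => if v == x then (v, n + 1) :: r else (x, 1) :: (v, n) :: r
  | [] => [(x, 1)]

def unique_repeat_count_alt (list : List Int) : Int :=
  let runs := (list.foldl pvStepRun []).reverse
  let dups := runs.foldl
    (fun (ds : List Int) (p : Int × Int) => if 2 ≤ p.2 ∧ p.1 ∉ ds then ds ++ [p.1] else ds) []
  (dups.length : Int)

-- ===== PRECONDITION & SPEC =====
def Spec_unique_repeat_count (list : List Int) (out : Int) : Prop := out = unique_repeat_count_alt list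
instance (list : List Int) (out : Int) : Decidable (Spec_unique_repeat_count list out) := by unfold Spec_unique_repeat_count; infer_instance

-- ===== CLAIM (what is proved, stated in full; the proofs are below) =====
def Claim_equal_unique_repeat_count : Prop := ∀ (list : List Int), Dom_unique_repeat_count list → Spec_unique_repeat_count list (unique_repeat_count list)

-- ===== LEMMAS AND PROOFS =====

-- A's index loop is a fold over the list of adjacent pairs.
theorem loop_as_pairs (xs : List Int) (init : Int × List Int)
    (step : Int × List Int → Int → Int → Int × List Int) :
    (PySem.List.pyRange 0 ((xs.length : Int) - 1) 1).foldl
      (fun st i => step st (PySem.List.pyGetD xs i 0) (PySem.List.pyGetD xs (i + 1) 0)) init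
    = (xs.zip xs.tail).foldl (fun st p => step st p.1 p.2) init := by
  rcases xs with _ | ⟨a, t⟩
  · simp [PySem.List.pyRange]
  · have hlen : ((a :: t).zip (a :: t).tail).length = t.length := by
      simp [List.length_zip]
    have hb : ((a :: t).length : Int) - 1 = (((a :: t).zip (a :: t).tail).length : Int) := by
      rw [hlen]; simp
    rw [hb]
    have hcongr :
        (PySem.List.pyRange 0 ((((a :: t).zip (a :: t).tail).length : Int)) 1).foldl
          (fun st i => step st (PySem.List.pyGetD (a :: t) i 0) (PySem.List.pyGetD (a :: t) (i + 1) 0)) init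
        = (PySem.List.pyRange 0 ((((a :: t).zip (a :: t).tail).length : Int)) 1).foldl
          (fun st i => step st (PySem.List.pyGetD ((a :: t).zip (a :: t).tail) i (0, 0)).1
                               (PySem.List.pyGetD ((a :: t).zip (a :: t).tail) i (0, 0)).2) init := by
      apply PySem.List.foldl_congr_mem
      intro st i hi
      have hmem := (PySem.List.mem_pyRange_one.mp hi)
      have h0 : 0 ≤ i := hmem.1
      have h1 : i < (((a :: t).zip (a :: t).tail).length : Int) := hmem.2
      have hz : (((a :: t).zip (a :: t).tail).length : Int) = ((a :: t).length : Int) - 1 := by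
        rw [hlen]; simp
      have h2' : i < ((a :: t).length : Int) := by omega
      have h3' : i + 1 < ((a :: t).length : Int) := by omega
      rw [PySem.List.pyGetD_eq_getElem _ (0, 0) h0 h1,
          PySem.List.pyGetD_eq_getElem (a :: t) 0 h0 h2',
          PySem.List.pyGetD_eq_getElem (a :: t) 0 (by omega : (0:Int) ≤ i + 1) h3']
      rw [List.getElem_zip]
      congr 1
      have hidx : (i + 1).toNat = i.toNat + 1 := by omega
      rw [getElem_congr rfl hidx (by omega)]
      exact (List.getElem_cons_succ a t i.toNat (by omega)).symm
    rw [hcongr]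
    exact PySem.List.foldl_pyRange_zero_pyGetD' ((a :: t).zip (a :: t).tail) (0, 0) (fun st p => step st p.1 p.2) init

-- the matching words of a pair list, in order
def hitsOf (l : List (Int × Int)) : List Int := (l.filter (fun p => p.1 == p.2)).map Prod.fst

-- A's loop invariant: its state is always (|seen|, seen), seen being the running set of hits.
theorem loopB (l : List (Int × Int)) (s : List Int) :
    l.foldl
      (fun (st : Int × List Int) p =>
        if (!(st.2.contains p.1)) && (p.1 == p.2) then (st.1 + 1, st.2 ++ [p.1]) else st)
      ((s.length : Int), s)
    = (((PySem.Set.update s (hitsOf l)).length : Int), PySem.Set.update s (hitsOf l)) := by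
  induction l generalizing s with
  | nil => simp [hitsOf, PySem.Set.update]
  | cons p t ih =>
    rcases p with ⟨a, b⟩
    simp only [List.foldl_cons]
    by_cases hab : a = b
    · subst hab
      by_cases hmem : a ∈ s
      · have hc : s.contains a = true := by simpa using hmem
        have hadd : PySem.Set.add s a = s := by simp [PySem.Set.add, hmem]
        simp only [hc, Bool.not_true, Bool.false_and, Bool.false_eq_true, if_false]
        rw [ih s]
        simp [hitsOf, PySem.Set.update, hadd]
      · have hc : s.contains a = false := by simpa using hmem
        have hadd : PySem.Set.add s a = s ++ [a] := by simp [PySem.Set.add, hmem]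
        simp only [hc, Bool.not_false, Bool.true_and, beq_self_eq_true, if_true]
        have hl : ((s.length : Int) + 1) = (((s ++ [a]).length : Int)) := by simp
        rw [hl, ih (s ++ [a])]
        simp [hitsOf, PySem.Set.update, hadd]
    · have hne : (a == b) = false := by simp [hab]
      simp only [hne, Bool.and_false, Bool.false_eq_true, if_false]
      rw [ih s]
      simp [hitsOf, PySem.Set.update, hne]

-- values owning a run of length ≥ 2, in run order
def valsOf (rs : List (Int × Int)) : List Int :=
  (rs.filter (fun p => decide (2 ≤ p.2))).map Prod.fst

theorem mem_valsOf (x : Int) (rs : List (Int × Int)) :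
    x ∈ valsOf rs ↔ ∃ p ∈ rs, p.1 = x ∧ 2 ≤ p.2 := by
  simp only [valsOf, List.mem_map, List.mem_filter, decide_eq_true_eq]
  constructor
  · rintro ⟨p, ⟨hp, h2⟩, hx⟩; exact ⟨p, hp, hx, h2⟩
  · rintro ⟨p, hp, hx, h2⟩; exact ⟨p, ⟨hp, h2⟩, hx⟩

-- unfolding "some pair of the cons list qualifies"
theorem exists_cons_pair (v n : Int) (r : List (Int × Int)) (x : Int) :
    (∃ p ∈ (v, n) :: r, p.1 = x ∧ 2 ≤ p.2) ↔
      (v = x ∧ 2 ≤ n) ∨ (∃ p ∈ r, p.1 = x ∧ 2 ≤ p.2) := by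
  constructor
  · rintro ⟨p, hp, hx, h2⟩
    rcases List.mem_cons.mp hp with rfl | hp'
    · exact Or.inl ⟨hx, h2⟩
    · exact Or.inr ⟨p, hp', hx, h2⟩
  · rintro (⟨hx, h2⟩ | ⟨p, hp, hx, h2⟩)
    · exact ⟨(v, n), List.mem_cons_self, hx, h2⟩
    · exact ⟨p, List.mem_cons_of_mem _ hp, hx, h2⟩

-- the run fold, started on an accumulator whose current run (v, n) has n ≥ 1, produces a
-- run of length ≥ 2 for x exactly when one is already there or v :: l has an adjacent x-pair.
theorem runs_mem_aux (x : Int) (l : List Int) : ∀ (v n : Int) (r : List (Int × Int)), 1 ≤ n →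
    ((∃ p ∈ l.foldl pvStepRun ((v, n) :: r), p.1 = x ∧ 2 ≤ p.2) ↔
      (∃ p ∈ (v, n) :: r, p.1 = x ∧ 2 ≤ p.2) ∨ x ∈ hitsOf ((v :: l).zip l)) := by
  induction l with
  | nil => intro v n r _; simp [hitsOf]
  | cons x0 t ih =>
    intro v n r hn
    simp only [List.foldl_cons]
    by_cases hv : v = x0
    · subst hv
      have hstep : pvStepRun ((v, n) :: r) v = (v, n + 1) :: r := by
        simp [pvStepRun]
      rw [hstep, ih v (n + 1) r (by omega)]
      have hhits : hitsOf ((v :: v :: t).zip (v :: t)) = v :: hitsOf ((v :: t).zip t) := by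
        simp [hitsOf]
      rw [hhits]
      rw [exists_cons_pair, exists_cons_pair]
      simp only [List.mem_cons]
      have h21 : (2 : Int) ≤ n + 1 := by omega
      have hxv : (x = v) ↔ (v = x) := eq_comm
      rw [hxv]
      constructor
      · rintro ((⟨hx, -⟩ | he) | hh)
        · exact Or.inr (Or.inl hx)
        · exact Or.inl (Or.inr he)
        · exact Or.inr (Or.inr hh)
      · rintro ((⟨hx, -⟩ | he) | hx | hh)
        · exact Or.inl (Or.inl ⟨hx, h21⟩)
        · exact Or.inl (Or.inr he)
        · exact Or.inl (Or.inl ⟨hx, h21⟩)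
        · exact Or.inr hh
    · have hstep : pvStepRun ((v, n) :: r) x0 = (x0, 1) :: (v, n) :: r := by
        simp [pvStepRun, hv]
      rw [hstep, ih x0 1 ((v, n) :: r) (by omega)]
      have hhits : hitsOf ((v :: x0 :: t).zip (x0 :: t)) = hitsOf ((x0 :: t).zip t) := by
        simp [hitsOf, hv]
      rw [hhits]
      rw [exists_cons_pair]
      have h21 : ¬ (2 : Int) ≤ 1 := by omega
      constructor
      · rintro ((⟨-, h2⟩ | he) | hh)
        · exact absurd h2 h21
        · exact Or.inl he
        · exact Or.inr hh
      · rintro (he | hh)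
        · exact Or.inl (Or.inr he)
        · exact Or.inr hh

theorem runs_mem (l : List Int) (x : Int) :
    (∃ p ∈ l.foldl pvStepRun [], p.1 = x ∧ 2 ≤ p.2) ↔ x ∈ hitsOf (l.zip l.tail) := by
  rcases l with _ | ⟨a, t⟩
  · simp [hitsOf]
  · have hstep : pvStepRun [] a = [(a, 1)] := by simp [pvStepRun]
    simp only [List.foldl_cons, hstep]
    rw [runs_mem_aux x t a 1 [] (by omega), exists_cons_pair]
    simp [show ¬ (2 : Int) ≤ 1 by omega]

-- B's dedup fold over the runs is Set.update with the qualifying values.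
theorem dedupB (l : List (Int × Int)) (s : List Int) :
    l.foldl (fun (ds : List Int) (p : Int × Int) =>
        if 2 ≤ p.2 ∧ p.1 ∉ ds then ds ++ [p.1] else ds) s
    = PySem.Set.update s (valsOf l) := by
  induction l generalizing s with
  | nil => simp [valsOf, PySem.Set.update]
  | cons p t ih =>
    rcases p with ⟨v, n⟩
    simp only [List.foldl_cons]
    by_cases h2 : 2 ≤ n
    · have hv : valsOf ((v, n) :: t) = v :: valsOf t := by simp [valsOf, h2]
      by_cases hmem : v ∈ s
      · have hadd : PySem.Set.add s v = s := by simp [PySem.Set.add, hmem]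
        simp only [h2, hmem, not_true, and_false, if_false]
        rw [ih s, hv]
        simp [PySem.Set.update, hadd]
      · have hadd : PySem.Set.add s v = s ++ [v] := by simp [PySem.Set.add, hmem]
        simp only [h2, hmem, not_false_iff, and_true, if_pos]
        rw [ih (s ++ [v]), hv]
        simp [PySem.Set.update, hadd]
    · have hv : valsOf ((v, n) :: t) = valsOf t := by simp [valsOf, h2]
      simp only [h2, false_and, if_false]
      rw [ih s, hv]

-- two deduplications of membership-equal lists have the same length
theorem len_ofList_eq_of_mem_iff (L1 L2 : List Int) (h : ∀ x, x ∈ L1 ↔ x ∈ L2) :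
    (PySem.Set.ofList L1).length = (PySem.Set.ofList L2).length := by
  apply List.Perm.length_eq
  rw [List.perm_ext_iff_of_nodup (PySem.Set.nodup_ofList L1) (PySem.Set.nodup_ofList L2)]
  intro x
  rw [PySem.Set.mem_ofList, PySem.Set.mem_ofList]
  exact h x

-- ===== VERDICT (by name: the statement is the Claim_ definition above) =====
theorem unique_repeat_count_spec : Claim_equal_unique_repeat_count := by
  intro list _
  unfold Spec_unique_repeat_count unique_repeat_count unique_repeat_count_alt
  rw [loop_as_pairs list (0, [])
      (fun st x y => if (!(st.2.contains x)) && (x == y) then (st.1 + 1, st.2 ++ [x]) else st)]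
  have h0 : ((([] : List Int).length : Int), ([] : List Int)) = ((0 : Int), ([] : List Int)) := by simp
  rw [← h0, loopB]
  simp only [dedupB]
  have hupd : ∀ (L : List Int), PySem.Set.update [] L = PySem.Set.ofList L := by
    intro L; simp [PySem.Set.ofList_eq_foldl, PySem.Set.update]
  rw [hupd, hupd]
  have hmem : ∀ x, x ∈ hitsOf (list.zip list.tail) ↔ x ∈ valsOf ((list.foldl pvStepRun []).reverse) := by
    intro x
    rw [mem_valsOf, ← runs_mem list x]
    constructor
    · rintro ⟨p, hp, h⟩; exact ⟨p, List.mem_reverse.mpr hp, h⟩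
    · rintro ⟨p, hp, h⟩; exact ⟨p, List.mem_reverse.mp hp, h⟩
  exact_mod_cast len_ofList_eq_of_mem_iff _ _ hmem
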